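-- pv_equiv track=rewrite | github.com/pypi-data/pypi-mirror-23 | packages/igdiscover/igdiscover-0.8.0.tar.gz/igdiscover-0.8.0/igdiscover/parse.py | split_by_section
-- ===== SOURCE A (Python) =====
-- def split_by_section(iterable, section_starts):
-- 	"""
-- 	Parse a stream of lines into chunks of sections. When one of the lines
-- 	starts with a string given in section_starts, a new section is started, and
-- 	a tuple (head, lines) is returned where head is the matching line and lines
-- 	contains a list of the lines following the section header, up to (but
-- 	excluding) the next section header.
--
-- 	Works a bit like str.split(), but on lines.
-- 	"""
-- 	lines = None
-- 	header = None
-- 	for line in iterable: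
-- 		line = line.strip()
-- 		for start in section_starts:
-- 			if line.startswith(start):
-- 				if header is not None:
-- 					yield (header, lines)
-- 				header = line
-- 				lines = []
-- 				break
-- 		else:
-- 			if header is None:
-- 				raise ParseError("Expected a line starting with one of {}".format(', '.join(section_starts)))
-- 			lines.append(line)
-- 	if header is not None:
-- 		yield (header, lines)
--
-- class ParseError(Exception):
-- 	pass
-- ===== SOURCE B (Python) =====
-- class ParseError(Exception):
--     pass
--
--
-- def split_by_section(iterable, section_starts):
--     # Index-based re-implementation: strip everything up front, locate the
--     # header positions in one scan, then slice the body of each section out.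
--     lines = [line.strip() for line in iterable]
--     headers = [(i, line) for i, line in enumerate(lines)
--                if any(line.startswith(start) for start in section_starts)]
--     if lines and (not headers or headers[0][0] != 0):
--         raise ParseError("Expected a line starting with one of {}".format(
--             ', '.join(section_starts)))
--     bounds = [i for i, _ in headers[1:]] + [len(lines)]
--     return [(line, lines[i + 1:j]) for (i, line), j in zip(headers, bounds)]
-- ===== Notes on version B (the rewrite author's own statement) =====
-- stated objective: alternative
-- what changed: A is a one-pass generator carrying header/lines accumulator state; B first strips all lines into a list, collects the header positions in a single enumerate scan, and then slices each section body out by index pairs.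
import Mathlib
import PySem

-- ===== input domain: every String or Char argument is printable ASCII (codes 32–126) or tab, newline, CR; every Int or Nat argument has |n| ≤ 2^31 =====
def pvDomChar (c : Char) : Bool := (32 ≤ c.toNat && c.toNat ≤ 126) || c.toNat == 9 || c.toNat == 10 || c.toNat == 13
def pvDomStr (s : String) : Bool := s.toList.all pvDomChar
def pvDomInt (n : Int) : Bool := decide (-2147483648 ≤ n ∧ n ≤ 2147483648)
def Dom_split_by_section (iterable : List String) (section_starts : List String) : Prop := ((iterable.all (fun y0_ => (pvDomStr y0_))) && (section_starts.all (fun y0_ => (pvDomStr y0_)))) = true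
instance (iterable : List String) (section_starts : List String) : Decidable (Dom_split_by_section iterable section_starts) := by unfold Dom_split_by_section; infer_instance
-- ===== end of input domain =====

-- B strips all lines first, finds the header positions in one enumerate scan, and slices each
-- section body out by index pairs, instead of A's one-pass accumulator loop (objective: alternative).


-- ===== PORT A =====
-- A's generator loop: state = (header?, lines accumulator, yielded output).  On a non-header
-- line with header = none Python raises ParseError; those inputs are outside Pre_ below
-- (here that branch is a no-op).
def split_by_section_loop (section_starts : List String) :
    List String → Option String → List String → List (String × List String) → List (String × List String)
  | [], header, lines, out =>
      match header with
      | some h => out ++ [(h, lines)]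
      | none => out
  | l :: rest, header, lines, out =>
      let line := PySem.Str.strip l
      if section_starts.any (fun start => PySem.Str.startswith line start) then
        match header with
        | some h => split_by_section_loop section_starts rest (some line) [] (out ++ [(h, lines)])
        | none => split_by_section_loop section_starts rest (some line) [] out
      else
        match header with
        | some h => split_by_section_loop section_starts rest (some h) (lines ++ [line]) out
        | none => split_by_section_loop section_starts rest none lines out  -- Python: raise ParseError (outside Pre_)

def split_by_section (iterable : List String) (section_starts : List String) : List (String × List String) :=
  split_by_section_loop section_starts iterable none [] []

-- ===== PORT B =====
def split_by_section_alt (iterable : List String) (section_starts : List String) : List (String × List String) :=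
  let lines := iterable.map PySem.Str.strip
  let headers := (PySem.List.enumerate lines 0).filter
      (fun p => section_starts.any (fun start => PySem.Str.startswith p.2 start))
  let bounds := (headers.drop 1).map (·.1) ++ [(lines.length : Int)]
  (headers.zip bounds).map (fun q => (q.1.2, PySem.List.slice lines (some (q.1.1 + 1)) (some q.2)))

-- ===== PRECONDITION & SPEC =====
-- Pre_ excludes exactly the inputs on which A raises ParseError: a non-empty stream whose
-- first (stripped) line does not start with any of section_starts.
def Pre_split_by_section (iterable : List String) (section_starts : List String) : Prop :=
  match iterable with
  | [] => True
  | l :: _ => section_starts.any (fun start => PySem.Str.startswith (PySem.Str.strip l) start) = true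

instance (iterable : List String) (section_starts : List String) : Decidable (Pre_split_by_section iterable section_starts) := by
  unfold Pre_split_by_section; cases iterable <;> infer_instance

def pvWitness_split_by_section : List String × List String := (["# a", " x ", "# b", "y"], ["#"])

def Spec_split_by_section (iterable : List String) (section_starts : List String) (out : List (String × List String)) : Prop := out = split_by_section_alt iterable section_starts
instance (iterable : List String) (section_starts : List String) (out : List (String × List String)) : Decidable (Spec_split_by_section iterable section_starts out) := by unfold Spec_split_by_section; infer_instance

-- ===== CLAIM (what is proved, stated in full; the proofs are below) =====
def Claim_equal_split_by_section : Prop := ∀ (iterable : List String) (section_starts : List String), Dom_split_by_section iterable section_starts → Pre_split_by_section iterable section_starts → Spec_split_by_section iterable section_starts (split_by_section iterable section_starts)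

-- ===== LEMMAS AND PROOFS =====

-- common reference shape: recursive span-splitting of the already-stripped lines
def pvSecs (f : String → Bool) : List String → List (String × List String)
  | [] => []
  | y :: t => (y, t.takeWhile (fun z => !f z)) :: pvSecs f (t.dropWhile (fun z => !f z))
termination_by l => l.length
decreasing_by
  have := List.length_dropWhile_le (fun z => !f z) t
  simp only [List.length_cons]
  omega

-- A's loop once a header is held, on pre-stripped lines
def pvGo (f : String → Bool) : List String → String → List String → List (String × List String)
  | [], h, acc => [(h, acc)]
  | y :: t, h, acc => if f y then (h, acc) :: pvGo f t y [] else pvGo f t h (acc ++ [y])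

-- B's zip/slice builder, over the full stripped list and a list of header (index, line) pairs
def pvBsecs (full : List String) (H : List (Int × String)) : List (String × List String) :=
  (H.zip ((H.drop 1).map (·.1) ++ [(full.length : Int)])).map
    (fun q => (q.1.2, PySem.List.slice full (some (q.1.1 + 1)) (some q.2)))

theorem pvSecs_nil (f : String → Bool) : pvSecs f [] = [] := by rw [pvSecs]

theorem pvSecs_cons (f : String → Bool) (y : String) (t : List String) :
    pvSecs f (y :: t)
      = (y, t.takeWhile (fun z => !f z)) :: pvSecs f (t.dropWhile (fun z => !f z)) := by
  rw [pvSecs]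

theorem pvLoop_eq (section_starts : List String)
    (f : String → Bool)
    (hf : f = fun line => section_starts.any (fun start => PySem.Str.startswith line start)) :
    ∀ (raw : List String) (h : String) (acc : List String) (out : List (String × List String)),
      split_by_section_loop section_starts raw (some h) acc out
        = out ++ pvGo f (raw.map PySem.Str.strip) h acc := by
  intro raw
  induction raw with
  | nil => intro h acc out; simp [split_by_section_loop, pvGo]
  | cons l rest ih =>
    intro h acc out
    by_cases hc : f (PySem.Str.strip l) = true
    · have hc' : (section_starts.any (fun start => PySem.Str.startswith (PySem.Str.strip l) start)) = true := by
        rw [hf] at hc; exact hc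
      simp only [split_by_section_loop, hc', if_pos, List.map_cons, pvGo, hc]
      rw [ih]
      simp
    · have hc' : (section_starts.any (fun start => PySem.Str.startswith (PySem.Str.strip l) start)) = false := by
        rw [hf] at hc; simpa using hc
      simp only [split_by_section_loop, hc', Bool.false_eq_true, if_false, List.map_cons, pvGo, hc]
      rw [ih]

theorem pvGo_eq_secs (f : String → Bool) :
    ∀ (ys : List String) (h : String) (acc : List String),
      pvGo f ys h acc
        = (h, acc ++ ys.takeWhile (fun z => !f z)) :: pvSecs f (ys.dropWhile (fun z => !f z)) := by
  intro ys
  induction ys with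
  | nil => intro h acc; simp [pvGo, pvSecs_nil]
  | cons y t ih =>
    intro h acc
    by_cases hy : f y = true
    · simp [pvGo, hy, pvSecs_cons, ih]
    · simp only [Bool.not_eq_true] at hy
      simp [pvGo, hy, ih]

theorem pvDropWhile_head_false {α : Type} (f : α → Bool) :
    ∀ (l : List α) (x : α) (xs : List α), l.dropWhile f = x :: xs → f x = false := by
  intro l
  induction l with
  | nil => intro x xs h; simp [List.dropWhile] at h
  | cons a t ih =>
    intro x xs h
    by_cases ha : f a = true
    · rw [List.dropWhile_cons_of_pos ha] at h; exact ih x xs h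
    · simp only [Bool.not_eq_true] at ha
      rw [List.dropWhile_cons_of_neg (by simp [ha])] at h
      cases h; exact ha

theorem pvFilter_enumerate_fails (f : String → Bool) (a : List String)
    (ha : ∀ x ∈ a, f x = false) (s : Int) :
    (PySem.List.enumerate a s).filter (fun p => f p.2) = [] := by
  rw [List.filter_eq_nil_iff]
  intro p hp
  rcases (PySem.List.mem_enumerate_iff _ _ _).1 hp with ⟨k, hk, rfl⟩
  simp [ha _ (a.getElem_mem hk)]

theorem pvBsecs_cons (full : List String) (x : Int × String) (H : List (Int × String)) :
    pvBsecs full (x :: H)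
      = (x.2, PySem.List.slice full (some (x.1 + 1))
          (some (match H with | [] => (full.length : Int) | h :: _ => h.1))) :: pvBsecs full H := by
  cases H <;> simp [pvBsecs]

theorem pvBsecs_eq_secs (f : String → Bool) :
    ∀ (n : Nat) (d : List String), d.length ≤ n →
      (d = [] ∨ ∃ y t, d = y :: t ∧ f y = true) →
      ∀ (pre : List String),
        pvBsecs (pre ++ d) ((PySem.List.enumerate d (pre.length : Int)).filter (fun p => f p.2))
          = pvSecs f d := by
  intro n
  induction n with
  | zero =>
    intro d hlen _ pre
    have : d = [] := List.eq_nil_of_length_eq_zero (Nat.le_zero.mp hlen)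
    subst this
    simp [pvBsecs, PySem.List.enumerate, pvSecs_nil]
  | succ n ih =>
    intro d hlen hhead pre
    rcases hhead with rfl | ⟨y, t, rfl, hy⟩
    · simp [pvBsecs, PySem.List.enumerate, pvSecs_nil]
    · have hta : t.takeWhile (fun z => !f z) ++ t.dropWhile (fun z => !f z) = t :=
        List.takeWhile_append_dropWhile
      have hfa : ∀ x ∈ t.takeWhile (fun z => !f z), f x = false := by
        intro x hx
        have := List.mem_takeWhile_imp hx
        simpa using this
      have henum : (PySem.List.enumerate (y :: t) (pre.length : Int)).filter (fun p => f p.2)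
          = ((pre.length : Int), y) ::
            (PySem.List.enumerate (t.dropWhile (fun z => !f z))
              ((pre.length : Int) + 1 + ((t.takeWhile (fun z => !f z)).length : Int))).filter
              (fun p => f p.2) := by
        rw [PySem.List.enumerate_cons]
        have : PySem.List.enumerate t ((pre.length : Int) + 1)
            = PySem.List.enumerate (t.takeWhile (fun z => !f z)) ((pre.length : Int) + 1)
              ++ PySem.List.enumerate (t.dropWhile (fun z => !f z))
                  ((pre.length : Int) + 1 + ((t.takeWhile (fun z => !f z)).length : Int)) := by
          conv_lhs => rw [← hta]
          rw [PySem.List.enumerate_append]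
        rw [this]
        simp [hy, List.filter_append,
          pvFilter_enumerate_fails f (t.takeWhile (fun z => !f z)) hfa]
      rw [henum]
      have hlen' : (t.dropWhile (fun z => !f z)).length ≤ n := by
        have h1 : (t.dropWhile (fun z => !f z)).length ≤ t.length := List.length_dropWhile_le _ t
        simp only [List.length_cons] at hlen
        omega
      have hfull : pre ++ y :: t = (pre ++ y :: t.takeWhile (fun z => !f z)) ++ t.dropWhile (fun z => !f z) := by
        conv_lhs => rw [← hta]
        simp
      have hdropfull : (pre ++ y :: t).drop (pre.length + 1) = t := by
        rw [← List.drop_drop, List.drop_left]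
        simp
      rcases hd'c : t.dropWhile (fun z => !f z) with _ | ⟨y', t''⟩
      · -- no further header: a single section running to the end
        have hat : t.takeWhile (fun z => !f z) = t := by
          conv_rhs => rw [← hta, hd'c]
          rw [List.append_nil]
        rw [pvBsecs_cons]
        simp only [PySem.List.enumerate_nil, List.filter_nil]
        have hslice : PySem.List.slice (pre ++ y :: t) (some ((pre.length : Int) + 1))
            (some (((pre ++ y :: t).length : Nat) : Int)) = t := by
          have h1 : ((pre.length : Int) + 1) = (((pre.length + 1 : Nat)) : Int) := by push_cast; ring
          rw [h1, PySem.List.slice_natCast, hdropfull]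
          apply List.take_of_length_le
          simp
          omega
        rw [hslice]
        conv_rhs => rw [pvSecs_cons, hd'c, pvSecs_nil, hat]
        simp [pvBsecs]
      · -- a further header at index pre.length + 1 + (takeWhile …).length
        have hy' : f y' = true := by
          have := pvDropWhile_head_false (fun z => !f z) t y' t'' hd'c
          simpa using this
        rw [PySem.List.enumerate_cons, List.filter_cons]
        simp only [hy', if_pos]
        rw [pvBsecs_cons]
        have hslice1 : PySem.List.slice (pre ++ y :: t) (some ((pre.length : Int) + 1))
            (some ((pre.length : Int) + 1 + (((t.takeWhile (fun z => !f z)).length : Nat) : Int)))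
            = t.takeWhile (fun z => !f z) := by
          have h1 : ((pre.length : Int) + 1) = (((pre.length + 1 : Nat)) : Int) := by push_cast; ring
          rw [h1, PySem.List.slice_natCast_add, hdropfull]
          exact (List.prefix_iff_eq_take.mp (List.takeWhile_prefix _)).symm
        rw [hslice1]
        have hoff : ((pre.length : Int) + 1 + (((t.takeWhile (fun z => !f z)).length : Nat) : Int))
            = (((pre ++ y :: t.takeWhile (fun z => !f z)).length : Nat) : Int) := by
          push_cast [List.length_append, List.length_cons]
          ring
        have hrec := ih (t.dropWhile (fun z => !f z)) hlen' (Or.inr ⟨y', t'', hd'c, hy'⟩)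
          (pre ++ y :: t.takeWhile (fun z => !f z))
        rw [← hfull, ← hoff, hd'c, PySem.List.enumerate_cons, List.filter_cons] at hrec
        simp only [hy', if_pos] at hrec
        rw [hrec]
        conv_rhs => rw [pvSecs_cons]
        rw [hd'c]

-- ===== VERDICT (by name: the statement is the Claim_ definition above) =====
theorem split_by_section_spec : Claim_equal_split_by_section := by
  intro iterable section_starts _ hpre
  unfold Spec_split_by_section
  set f : String → Bool := fun line => section_starts.any (fun start => PySem.Str.startswith line start) with hf
  cases iterable with
  | nil =>
    simp [split_by_section, split_by_section_loop, split_by_section_alt]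
  | cons l rest =>
    have hpre' : f (PySem.Str.strip l) = true := by
      unfold Pre_split_by_section at hpre
      rw [hf]; exact hpre
    -- A side
    have hA : split_by_section (l :: rest) section_starts
        = pvSecs f (PySem.Str.strip l :: rest.map PySem.Str.strip) := by
      unfold split_by_section
      rw [split_by_section_loop]
      simp only [hf] at hpre'
      simp only [hpre', if_pos]
      rw [pvLoop_eq section_starts f hf]
      rw [pvGo_eq_secs]
      rw [pvSecs_cons]
      simp
    -- B side
    have hB : split_by_section_alt (l :: rest) section_starts
        = pvBsecs ((l :: rest).map PySem.Str.strip)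
            ((PySem.List.enumerate ((l :: rest).map PySem.Str.strip) 0).filter (fun p => f p.2)) := by
      rfl
    rw [hA, hB]
    have h0 : (0 : Int) = ((([] : List String).length : Nat) : Int) := by simp
    rw [h0]
    have := pvBsecs_eq_secs f ((l :: rest).map PySem.Str.strip).length
      ((l :: rest).map PySem.Str.strip) (le_refl _)
      (Or.inr ⟨PySem.Str.strip l, rest.map PySem.Str.strip, by simp, hpre'⟩) []
    rw [List.nil_append] at this
    rw [this]
    simp
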